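-- pv_equiv track=rewrite | github.com/AnnaYaki/autotests_course | Homework/lesson_4/4_star.py | max_division_by_3
-- ===== SOURCE A (Python) =====
-- def max_division_by_3(num):
--     # Здесь нужно написать код
--     arr = []
--     new_num = 0
--     mun = num
--     while num > 0:
--         arr.append(num % 10)
--         num = num // 10
--     dlina = len(arr)
--     new_arr = []
--     for i in range(dlina):
--         new_arr.append(9)
--     for i in new_arr:
--         new_num = new_num * 10 + i
--
--     arr_del3 = []
--     for i in range(new_num):
--         if i % 3 == 0:
--             arr_del3.append(i)
--     arr_znak = []
--     for i in arr_del3: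
--         if i >= 10 ** (dlina - 1):
--             arr_znak.append(i)
--     povtor = dlina
--     num = mun
--     arr_itog = []
--     gnom = 0
--     for i in arr_znak:
--         povtor = dlina
--         gnom = 0
--         while povtor > 0:
--             x = str(i)
--             y = str(num)
--             if x[povtor - 1] == y[povtor - 1]:
--                 gnom += 1
--             povtor = povtor - 1
--         if gnom >= dlina - 1:
--             arr_itog.append(i)
--     new_num = max(arr_itog)
--
--     return new_num
-- ===== SOURCE B (Python) =====
-- def max_division_by_3(num):
--     # arithmetic digit-replacement enumeration: O(digits) instead of scanning all numbers below 10**d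
--     d = 0
--     t = num
--     while t > 0:
--         d += 1
--         t = t // 10
--     best = None
--     p = 1
--     rest = num
--     for pos in range(d):
--         digit = rest % 10
--         rest = rest // 10
--         lo = 1 if pos == d - 1 else 0
--         for v in range(lo, 10):
--             cand = num + (v - digit) * p
--             if cand % 3 == 0 and (best is None or cand > best):
--                 best = cand
--         p = p * 10
--     return best
-- ===== Notes on version B (the rewrite author's own statement) =====
-- stated objective: faster
-- what changed: B enumerates the ~10*d single-digit-replacement candidates arithmetically and keeps a running max, instead of scanning every integer below 10^d and comparing digit strings.
-- intended difference: On positive num whose d decimal digits contain at least d-1 nines, the all-nines number 10^d-1 is within one digit change and divisible by 3, but A's exclusive range bound excludes it, so A returns a smaller multiple of 3 while B returns 10^d-1, the intended maximum. — e.g. on max_division_by_3(9): A returns 6, B returns 9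
import Mathlib
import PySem

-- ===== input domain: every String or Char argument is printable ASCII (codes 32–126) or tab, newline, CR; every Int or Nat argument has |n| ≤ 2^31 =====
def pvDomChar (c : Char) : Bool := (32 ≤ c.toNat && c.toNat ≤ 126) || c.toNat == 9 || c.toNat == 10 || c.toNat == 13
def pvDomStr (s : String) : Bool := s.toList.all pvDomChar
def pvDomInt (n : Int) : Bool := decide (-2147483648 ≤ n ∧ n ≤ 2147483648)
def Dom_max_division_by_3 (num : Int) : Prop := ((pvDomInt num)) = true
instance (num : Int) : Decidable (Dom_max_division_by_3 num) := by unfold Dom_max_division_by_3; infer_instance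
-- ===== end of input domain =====

-- B replaces A's scan of every integer below 10^d by arithmetic enumeration of the ~10*d
-- single-digit-replacement candidates (O(d^2) instead of O(num*d)); on inputs with at least
-- d-1 nine-digits A misses the all-nines answer (stated as D_ below).

-- ===== PORT A =====
-- while num > 0: arr.append(num % 10); num //= 10   (fuel only makes the loop structural)
def pvDigitsAGo : Nat → Int → List Int → List Int
  | 0, _, arr => arr
  | fuel + 1, num, arr =>
    if 0 < num then pvDigitsAGo fuel (PySem.Int.floordiv num 10) (arr ++ [PySem.Int.mod num 10]) else arr

def pvDigitsA (num : Int) (arr : List Int) : List Int := pvDigitsAGo (num.toNat + 1) num arr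

-- while povtor > 0: if x[povtor-1] == y[povtor-1]: gnom += 1; povtor -= 1   (fuel only makes the loop structural)
def pvGnomAGo (x y : List Char) : Nat → Int → Int → Int
  | 0, _, gnom => gnom
  | fuel + 1, povtor, gnom =>
    if 0 < povtor then
      pvGnomAGo x y fuel (povtor - 1)
        (if PySem.List.pyGet? x (povtor - 1) = PySem.List.pyGet? y (povtor - 1) then gnom + 1 else gnom)
    else gnom

def pvGnomA (x y : List Char) (povtor : Int) (gnom : Int) : Int :=
  pvGnomAGo x y (povtor.toNat + 1) povtor gnom

def max_division_by_3 (num : Int) : Int :=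
  let arr := pvDigitsA num []
  let dlina := arr.length
  let new_arr := (PySem.List.pyRange 0 (dlina : Int)).foldl (fun l _ => l ++ [(9 : Int)]) []
  let new_num := new_arr.foldl (fun a i => a * 10 + i) 0
  let arr_del3 := (PySem.List.pyRange 0 new_num).foldl
      (fun l i => if PySem.Int.mod i 3 = 0 then l ++ [i] else l) []
  -- note: for num ≤ 0 Python's 10 ** (dlina - 1) is the float 0.1, but that loop runs over an
  -- empty list then, so the Nat subtraction below is exact on every reachable iteration
  let arr_znak := arr_del3.foldl
      (fun l i => if (10 : Int) ^ (dlina - 1) ≤ i then l ++ [i] else l) []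
  let arr_itog := arr_znak.foldl
      (fun l i =>
        if (dlina : Int) - 1 ≤ pvGnomA (PySem.Int.toChars i) (PySem.Int.toChars num) (dlina : Int) 0
        then l ++ [i] else l) []
  match PySem.List.max? arr_itog id with
  | some v => v
  | none => 0   -- Python's max([]) raises ValueError here; excluded by Pre_

-- ===== PORT B =====
-- while t > 0: d += 1; t //= 10   (fuel only makes the loop structural)
def pvCountBGo : Nat → Int → Int → Int
  | 0, _, d => d
  | fuel + 1, t, d =>
    if 0 < t then pvCountBGo fuel (PySem.Int.floordiv t 10) (d + 1) else d

def pvCountB (t : Int) (d : Int) : Int := pvCountBGo (t.toNat + 1) t d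

-- inner loop: for v in range(lo, 10): cand = num + (v - digit) * p; keep running max of multiples of 3
def pvBestB (num digit p : Int) (lo : Int) (best : Option Int) : Option Int :=
  (PySem.List.pyRange lo 10).foldl
    (fun b v =>
      let cand := num + (v - digit) * p
      if PySem.Int.mod cand 3 = 0 && (match b with | none => true | some bb => decide (bb < cand))
      then some cand else b)
    best

def max_division_by_3_alt (num : Int) : Int :=
  let d := pvCountB num 0
  let st := (PySem.List.pyRange 0 d).foldl
    (fun (st : Option Int × Int × Int) pos =>
      let digit := PySem.Int.mod st.2.2 10
      let rest := PySem.Int.floordiv st.2.2 10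
      let lo : Int := if pos = d - 1 then 1 else 0
      (pvBestB num digit st.2.1 lo st.1, st.2.1 * 10, rest))
    ((none : Option Int), (1 : Int), num)
  match st.1 with
  | some b => b
  | none => 0   -- Python returns None here (num ≤ 0); excluded by Pre_

-- ===== PRECONDITION & SPEC =====
-- Pre_ excludes num ≤ 0, where A's max(arr_itog) is max([]) and raises ValueError
def Pre_max_division_by_3 (num : Int) : Prop := 0 < num
instance (num : Int) : Decidable (Pre_max_division_by_3 num) := by
  unfold Pre_max_division_by_3; infer_instance
def pvWitness_max_division_by_3 : Int := 12

-- digit q (from the least significant end) of x, and the number of decimal digits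
def pvDig (x : Int) (q : Nat) : Int := x / 10 ^ q % 10
def pvND (num : Int) : Nat := (Nat.digits 10 num.toNat).length

-- On positive num whose d decimal digits contain at least d-1 nines, the all-nines number
-- 10^d-1 is within one digit change and divisible by 3, but A's exclusive range bound
-- excludes it, so A returns a smaller multiple of 3 while B returns 10^d-1, the intended
-- maximum.
def D_max_division_by_3 (num : Int) : Prop :=
  0 < num ∧ ∃ pos < pvND num, ∀ q < pvND num, q ≠ pos → pvDig num q = 9
instance (num : Int) : Decidable (D_max_division_by_3 num) := by
  unfold D_max_division_by_3; infer_instance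

def Spec_max_division_by_3 (num : Int) (out : Int) : Prop :=
  ¬ D_max_division_by_3 num → out = max_division_by_3_alt num
instance (num : Int) (out : Int) : Decidable (Spec_max_division_by_3 num out) := by
  unfold Spec_max_division_by_3; infer_instance

def pvDiffWitness_max_division_by_3 : Int := 9
def pvDiffWitnessOut_max_division_by_3 : Int × Int := (6, 9)

-- ===== CLAIM (what is proved, stated in full; the proofs are below) =====
def Claim_unchanged_max_division_by_3 : Prop :=
  ∀ (num : Int), Dom_max_division_by_3 num → Pre_max_division_by_3 num →
    Spec_max_division_by_3 num (max_division_by_3 num)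
def Claim_changed_max_division_by_3 : Prop :=
  Dom_max_division_by_3 (pvDiffWitness_max_division_by_3) ∧
  Pre_max_division_by_3 (pvDiffWitness_max_division_by_3) ∧
  D_max_division_by_3 (pvDiffWitness_max_division_by_3) ∧
  max_division_by_3 (pvDiffWitness_max_division_by_3) = pvDiffWitnessOut_max_division_by_3.1 ∧
  max_division_by_3_alt (pvDiffWitness_max_division_by_3) = pvDiffWitnessOut_max_division_by_3.2 ∧
  pvDiffWitnessOut_max_division_by_3.1 ≠ pvDiffWitnessOut_max_division_by_3.2
def Claim_exact_max_division_by_3 : Prop :=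
  ∀ (num : Int), Dom_max_division_by_3 num → Pre_max_division_by_3 num →
    D_max_division_by_3 num → max_division_by_3 num ≠ max_division_by_3_alt num

-- ===== LEMMAS AND PROOFS =====

-- digit bounds
theorem pvDig_nonneg (x : Int) (q : Nat) : 0 ≤ pvDig x q := by
  unfold pvDig
  exact Int.emod_nonneg _ (by norm_num)

theorem pvDig_lt (x : Int) (q : Nat) : pvDig x q < 10 := by
  unfold pvDig
  exact Int.emod_lt_of_pos _ (by norm_num)

-- range of a positive number with d digits
theorem pvND_pos (num : Int) (h : 0 < num) : 0 < pvND num := by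
  unfold pvND
  have : num.toNat ≠ 0 := by omega
  have h2 : Nat.digits 10 num.toNat ≠ [] := Nat.digits_ne_nil_iff_ne_zero.mpr this
  exact List.length_pos_iff.mpr h2

theorem pvND_upper (num : Int) (h : 0 ≤ num) : num < 10 ^ pvND num := by
  have := @Nat.lt_base_pow_length_digits 10 num.toNat (by norm_num)
  unfold pvND
  have h2 : (num.toNat : Int) < ((10:Nat) ^ (Nat.digits 10 num.toNat).length : Nat) := by
    exact_mod_cast this
  push_cast at h2
  omega

theorem pvND_lower (num : Int) (h : 0 < num) : 10 ^ (pvND num - 1) ≤ num := by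
  have hm : num.toNat ≠ 0 := by omega
  have hlen : (Nat.digits 10 num.toNat).length = Nat.log 10 num.toNat + 1 :=
    Nat.length_digits 10 num.toNat (by norm_num) hm
  have hlog : 10 ^ Nat.log 10 num.toNat ≤ num.toNat := Nat.pow_log_le_self 10 hm
  unfold pvND
  rw [hlen]
  simp only [Nat.add_sub_cancel]
  have h2 : ((10:Nat) ^ Nat.log 10 num.toNat : Nat) ≤ (num.toNat : Int) := by exact_mod_cast hlog
  push_cast at h2
  omega

-- digit q of x only depends on x % 10^(q+1)
theorem pvDig_eq_emod_form (x : Int) (q : Nat) :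
    pvDig x q = (x % 10 ^ (q + 1)) / 10 ^ q % 10 := by
  unfold pvDig
  have hq : (10:Int) ^ q ≠ 0 := by positivity
  have hx : 10 ^ (q+1) * (x / 10 ^ (q+1)) + x % 10 ^ (q+1) = x := Int.mul_ediv_add_emod x (10 ^ (q+1))
  conv_lhs => rw [← hx]
  have e : (10:Int) ^ (q+1) * (x / 10 ^ (q+1)) = (x / 10 ^ (q+1) * 10) * 10 ^ q := by ring
  rw [e, add_comm, Int.add_mul_ediv_right _ _ hq]
  omega

theorem pvDig_eq_of_emod_eq (x y : Int) (q : Nat)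
    (h : x % 10 ^ (q + 1) = y % 10 ^ (q + 1)) : pvDig x q = pvDig y q := by
  rw [pvDig_eq_emod_form, pvDig_eq_emod_form, h]

-- decomposition at a position: x = hi * 10^(pos+1) + (pvDig x pos) * 10^pos + lo
theorem pvDig_decomp (x : Int) (pos : Nat) :
    x = (x / 10 ^ (pos + 1)) * 10 ^ (pos + 1) + pvDig x pos * 10 ^ pos + x % 10 ^ pos := by
  unfold pvDig
  have e1 : x / 10 ^ (pos+1) = (x / 10 ^ pos) / 10 := by
    rw [pow_succ]
    exact (Int.ediv_ediv_of_nonneg (by positivity)).symm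
  have e2 := Int.mul_ediv_add_emod x (10 ^ pos)
  have e3 := Int.mul_ediv_add_emod (x / 10 ^ pos) 10
  rw [e1, pow_succ]
  linear_combination -e2 - (10:Int) ^ pos * e3

-- replacing digit pos of num by v: value, digits and bounds of the candidate
theorem pvChange_spec (num : Int) (d pos : Nat) (v : Int)
    (h0 : 0 ≤ num) (h1 : num < 10 ^ d) (hp : pos < d) (hv0 : 0 ≤ v) (hv : v < 10) :
    0 ≤ num + (v - pvDig num pos) * 10 ^ pos ∧
    num + (v - pvDig num pos) * 10 ^ pos < 10 ^ d ∧
    pvDig (num + (v - pvDig num pos) * 10 ^ pos) pos = v ∧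
    ∀ q : Nat, q ≠ pos → pvDig (num + (v - pvDig num pos) * 10 ^ pos) q = pvDig num q := by
  set c := num + (v - pvDig num pos) * 10 ^ pos with hc
  have hdecomp := pvDig_decomp num pos
  have hdnn := pvDig_nonneg num pos
  have hdlt := pvDig_lt num pos
  have hlo0 : 0 ≤ num % 10 ^ pos := Int.emod_nonneg _ (by positivity)
  have hlolt : num % 10 ^ pos < 10 ^ pos := Int.emod_lt_of_pos _ (by positivity)
  have hhi0 : 0 ≤ num / 10 ^ (pos + 1) := Int.ediv_nonneg h0 (by positivity)
  -- c in explicit form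
  have hcform : c = (num / 10 ^ (pos + 1)) * 10 ^ (pos + 1) + v * 10 ^ pos + num % 10 ^ pos := by
    rw [hc]
    linear_combination hdecomp
  have hppos : (0:Int) < 10 ^ pos := by positivity
  have hp1pos : (0:Int) < 10 ^ (pos+1) := by positivity
  -- hi bound: num / 10^(pos+1) < 10^(d-pos-1)
  have hhile : num / 10 ^ (pos + 1) ≤ (10 ^ d - 1) / 10 ^ (pos + 1) := by
    apply Int.ediv_le_ediv hp1pos
    omega
  have hhib : (10:Int) ^ d - 1 = (10 ^ (d - (pos+1)) - 1) * 10 ^ (pos+1) + (10 ^ (pos+1) - 1) := by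
    have : (10:Int) ^ d = 10 ^ (d - (pos+1)) * 10 ^ (pos+1) := by
      rw [← pow_add]
      congr 1
      omega
    rw [this]
    ring
  have hhival : ((10:Int) ^ d - 1) / 10 ^ (pos + 1) = 10 ^ (d - (pos+1)) - 1 := by
    rw [hhib, add_comm, Int.add_mul_ediv_right _ _ (by positivity : (10:Int)^(pos+1) ≠ 0),
      Int.ediv_eq_zero_of_lt (by omega) (by omega)]
    ring
  have hhi : num / 10 ^ (pos + 1) ≤ 10 ^ (d - (pos+1)) - 1 := by
    rw [hhival] at hhile
    exact hhile
  have hsplit : (10:Int) ^ d = 10 ^ (d - (pos+1)) * 10 ^ (pos+1) := by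
    rw [← pow_add]
    congr 1
    omega
  have hvlo : 0 ≤ v * 10 ^ pos + num % 10 ^ pos := by positivity
  have hvhi : v * 10 ^ pos + num % 10 ^ pos < 10 ^ (pos + 1) := by
    have : v * 10 ^ pos ≤ 9 * 10 ^ pos := by nlinarith
    have h10 : (10:Int) ^ (pos+1) = 10 * 10 ^ pos := by ring
    omega
  refine ⟨?_, ?_, ?_, ?_⟩
  · rw [hcform]; positivity
  · rw [hcform, hsplit]
    nlinarith [hhi, hvhi]
  · -- digit pos of c is v
    have : c / 10 ^ pos = v + (num / 10 ^ (pos+1)) * 10 := by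
      rw [hcform]
      have e : (num / 10 ^ (pos + 1)) * 10 ^ (pos + 1) + v * 10 ^ pos + num % 10 ^ pos
          = num % 10 ^ pos + (v + num / 10 ^ (pos + 1) * 10) * 10 ^ pos := by ring
      rw [e, Int.add_mul_ediv_right _ _ (by positivity : (10:Int)^pos ≠ 0),
        Int.ediv_eq_zero_of_lt hlo0 hlolt]
      ring
    unfold pvDig
    rw [this]
    omega
  · intro q hq
    rcases Nat.lt_or_ge q pos with hqlt | hqge
    · -- low digit: c % 10^(q+1) = num % 10^(q+1)
      apply pvDig_eq_of_emod_eq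
      have hdvd : (10:Int) ^ (q + 1) ∣ 10 ^ pos := pow_dvd_pow 10 (by omega)
      obtain ⟨k, hk⟩ := hdvd
      rw [hc, hk]
      have e : num + (v - pvDig num pos) * (10 ^ (q+1) * k)
          = num + 10 ^ (q+1) * ((v - pvDig num pos) * k) := by ring
      rw [e, Int.add_mul_emod_self_left]
    · -- high digit: c / 10^(q) ... both determined by c / 10^(pos+1) = num / 10^(pos+1)
      have hq1 : pos + 1 ≤ q := by omega
      have hcdiv : c / 10 ^ (pos+1) = num / 10 ^ (pos+1) := by
        rw [hcform]
        have e : (num / 10 ^ (pos + 1)) * 10 ^ (pos + 1) + v * 10 ^ pos + num % 10 ^ pos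
            = (v * 10 ^ pos + num % 10 ^ pos) + (num / 10 ^ (pos + 1)) * 10 ^ (pos+1) := by ring
        rw [e, Int.add_mul_ediv_right _ _ (by positivity : (10:Int)^(pos+1) ≠ 0),
          Int.ediv_eq_zero_of_lt hvlo hvhi]
        ring
      unfold pvDig
      have hqe : (10:Int) ^ q = 10 ^ (pos+1) * 10 ^ (q - (pos+1)) := by
        rw [← pow_add]
        congr 1
        omega
      rw [hqe, ← Int.ediv_ediv_of_nonneg (by positivity), hcdiv,
        Int.ediv_ediv_of_nonneg (by positivity)]

-- positional sum decomposition
theorem pvSumDig (d : Nat) (x : Int) :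
    x = (Finset.range d).sum (fun q => pvDig x q * 10 ^ q) + (x / 10 ^ d) * 10 ^ d := by
  induction d with
  | zero => simp
  | succ n ih =>
    rw [Finset.sum_range_succ]
    have e1 : x / 10 ^ (n+1) = x / 10 ^ n / 10 := by
      rw [pow_succ]
      exact (Int.ediv_ediv_of_nonneg (by positivity)).symm
    have e3 := Int.mul_ediv_add_emod (x / 10 ^ n) 10
    have ih' := ih
    unfold pvDig at ih' ⊢
    rw [e1, pow_succ]
    linear_combination ih' - (10:Int) ^ n * e3

-- two d-digit-bounded numbers agreeing except at pos differ exactly by the pos digit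
theorem pvAgree_eq (i num : Int) (d pos : Nat)
    (hi0 : 0 ≤ i) (hi1 : i < 10 ^ d) (hn0 : 0 ≤ num) (hn1 : num < 10 ^ d) (hp : pos < d)
    (hagree : ∀ q < d, q ≠ pos → pvDig i q = pvDig num q) :
    i = num + (pvDig i pos - pvDig num pos) * 10 ^ pos := by
  have hdi : i / 10 ^ d = 0 := Int.ediv_eq_zero_of_lt hi0 hi1
  have hdn : num / 10 ^ d = 0 := Int.ediv_eq_zero_of_lt hn0 hn1
  have si := pvSumDig d i
  have sn := pvSumDig d num
  rw [hdi] at si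
  rw [hdn] at sn
  simp at si sn
  have hsum : (Finset.range d).sum (fun q => pvDig i q * 10 ^ q)
      - (Finset.range d).sum (fun q => pvDig num q * 10 ^ q)
      = (pvDig i pos - pvDig num pos) * 10 ^ pos := by
    rw [← Finset.sum_sub_distrib]
    rw [Finset.sum_eq_single pos]
    · ring
    · intro q hq hqne
      have := hagree q (Finset.mem_range.mp hq) hqne
      rw [this]
      ring
    · intro h
      exact absurd (Finset.mem_range.mpr hp) h
  omega

-- leading digit: for 0 ≤ i < 10^d, d ≥ 1:  10^(d-1) ≤ i ↔ 1 ≤ pvDig i (d-1)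
theorem pvLead (i : Int) (d : Nat) (hd : 0 < d) (hi0 : 0 ≤ i) (hi1 : i < 10 ^ d) :
    (10 ^ (d - 1) ≤ i ↔ 1 ≤ pvDig i (d - 1)) := by
  have hsplit : (10:Int) ^ d = 10 ^ (d-1) * 10 := by
    rw [← pow_succ]
    congr 1
    omega
  have hq : i / 10 ^ (d-1) < 10 := by
    rw [Int.ediv_lt_iff_lt_mul (by positivity)]
    omega
  have hq0 : 0 ≤ i / 10 ^ (d-1) := Int.ediv_nonneg hi0 (by positivity)
  have hdig : pvDig i (d-1) = i / 10 ^ (d-1) := by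
    unfold pvDig
    omega
  rw [hdig]
  rw [Int.le_ediv_iff_mul_le (by positivity)]
  omega

-- digits of the all-nines number
theorem pvNines_dig (d q : Nat) (h : q < d) : pvDig (10 ^ d - 1) q = 9 := by
  have hsplit : (10:Int) ^ d = 10 ^ (d - q) * 10 ^ q := by
    rw [← pow_add]
    congr 1
    omega
  have hq : (0:Int) < 10 ^ q := by positivity
  have hdq : (10:Int) ^ (d - q) = 10 ^ (d - q - 1) * 10 := by
    rw [← pow_succ]
    congr 1
    omega
  have hdiv : ((10:Int) ^ d - 1) / 10 ^ q = 10 ^ (d - q) - 1 := by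
    have e : (10:Int) ^ d - 1 = (10 ^ q - 1) + (10 ^ (d - q) - 1) * 10 ^ q := by
      rw [hsplit]
      ring
    conv_lhs => rw [e]
    rw [Int.add_mul_ediv_right _ _ (by positivity : (10:Int)^q ≠ 0),
      Int.ediv_eq_zero_of_lt (by omega) (by omega)]
    ring
  unfold pvDig
  unfold pvDig at hdiv
  rw [hdiv, hdq]
  omega

-- 3 divides 10^d - 1
theorem pvThree_dvd (d : Nat) : (3:Int) ∣ 10 ^ d - 1 := by
  induction d with
  | zero => simp
  | succ n ih =>
    obtain ⟨k, hk⟩ := ih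
    exact ⟨10 * k + 3, by rw [pow_succ]; omega⟩

-- a number < 10^d all of whose digits below d are 9 is 10^d - 1
theorem pvAllNines (c : Int) (d : Nat) (hd : 0 < d) (h0 : 0 ≤ c) (h1 : c < 10 ^ d)
    (h9 : ∀ q < d, pvDig c q = 9) : c = 10 ^ d - 1 := by
  have hpow : (1:Int) ≤ 10 ^ d := one_le_pow₀ (by norm_num)
  have h := pvAgree_eq c (10 ^ d - 1) d 0 h0 h1 (by omega) (by omega) hd
    (by
      intro q hq _
      rw [h9 q hq, pvNines_dig d q hq])
  rw [h9 0 hd, pvNines_dig d 0 hd] at h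
  simpa using h

theorem pvDigitsAGo_length : ∀ (fuel : Nat) (num : Int) (arr : List Int), num.toNat < fuel →
    (pvDigitsAGo fuel num arr).length = arr.length + pvND num := by
  intro fuel
  induction fuel with
  | zero => omega
  | succ n ih =>
    intro num arr h
    unfold pvDigitsAGo
    split_ifs with hpos
    · rw [ih _ _ (by rw [PySem.Int.floordiv_eq_ediv_of_pos (by norm_num)]; omega)]
      unfold pvND
      rw [PySem.Int.floordiv_eq_ediv_of_pos (by norm_num)]
      have h2 : (num / 10).toNat = num.toNat / 10 := by omega
      rw [h2]
      rw [Nat.digits_def' (by norm_num : 1 < 10) (by omega : 0 < num.toNat)]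
      simp
      omega
    · unfold pvND
      have : num.toNat = 0 := by omega
      rw [this]
      simp


theorem pvCountBGo_eq : ∀ (fuel : Nat) (t d : Int), t.toNat < fuel →
    pvCountBGo fuel t d = d + (pvND t : Int) := by
  intro fuel
  induction fuel with
  | zero => omega
  | succ n ih =>
    intro t d h
    unfold pvCountBGo
    split_ifs with hpos
    · rw [ih _ _ (by rw [PySem.Int.floordiv_eq_ediv_of_pos (by norm_num)]; omega)]
      unfold pvND
      rw [PySem.Int.floordiv_eq_ediv_of_pos (by norm_num)]
      have h2 : (t / 10).toNat = t.toNat / 10 := by omega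
      rw [h2, Nat.digits_def' (by norm_num : 1 < 10) (by omega : 0 < t.toNat)]
      simp
      omega
    · unfold pvND
      have : t.toNat = 0 := by omega
      rw [this]
      simp

-- the nines loops
theorem pvRep_fold (xs : List Int) (acc : List Int) :
    xs.foldl (fun l _ => l ++ [(9:Int)]) acc = acc ++ List.replicate xs.length 9 := by
  induction xs generalizing acc with
  | nil => simp
  | cons x t ih =>
    rw [List.foldl_cons, ih]
    simp [List.replicate_succ]

theorem pvNines_fold (d : Nat) (a : Int) :
    (List.replicate d (9:Int)).foldl (fun a i => a * 10 + i) a = a * 10 ^ d + (10 ^ d - 1) := by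
  induction d generalizing a with
  | zero => simp
  | succ n ih =>
    rw [List.replicate_succ, List.foldl_cons, ih]
    ring

-- foldl-append-if to filter (glue over PySem.List.foldl_append_if)
theorem pvFilter_fold {α : Type} (P : α → Prop) [DecidablePred P] (l acc : List α) :
    l.foldl (fun acc x => if P x then acc ++ [x] else acc) acc
      = acc ++ l.filter (fun x => decide (P x)) := by
  have h := PySem.List.foldl_append_if (fun x => decide (P x)) (fun x => x) l acc
  simpa using h

-- the digit-comparing while loop counts matching positions
theorem pvGnomAGo_count (x y : List Char) :
    ∀ (k : Nat) (fuel : Nat) (g : Int), k ≤ fuel →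
    pvGnomAGo x y fuel (k : Int) g
      = g + ((List.range k).countP
          (fun (j : Nat) => decide (PySem.List.pyGet? x (j : Int) = PySem.List.pyGet? y (j : Int))) : Int) := by
  intro k
  induction k with
  | zero =>
    intro fuel g _
    cases fuel with
    | zero => simp [pvGnomAGo]
    | succ f => simp [pvGnomAGo]
  | succ n ih =>
    intro fuel g hf
    cases fuel with
    | zero => omega
    | succ f =>
      unfold pvGnomAGo
      rw [if_pos (by push_cast; omega)]
      have e : ((n + 1 : Nat) : Int) - 1 = (n : Int) := by push_cast; omega
      rw [e, ih f _ (by omega)]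
      rw [List.range_succ, List.countP_append]
      simp only [List.countP_cons, List.countP_nil]
      by_cases h : PySem.List.pyGet? x (n : Int) = PySem.List.pyGet? y (n : Int)
      · rw [if_pos h]
        simp only [h, decide_true]
        push_cast
        omega
      · rw [if_neg h]
        simp only [decide_eq_false h]
        push_cast
        omega


-- Nat.toDigits is the reversed digit list rendered as characters
theorem pvToDigitsCore_eq : ∀ (fuel n : Nat) (l : List Char), n < fuel → 0 < n →
    Nat.toDigitsCore 10 fuel n l = ((Nat.digits 10 n).map Nat.digitChar).reverse ++ l := by
  intro fuel
  induction fuel with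
  | zero => omega
  | succ f ih =>
    intro n l hf hn
    rw [Nat.toDigitsCore]
    by_cases h : n / 10 = 0
    · simp only [h]
      have hlt : n < 10 := by omega
      rw [Nat.digits_def' (by norm_num : 1 < 10) hn, Nat.div_eq_of_lt hlt]
      simp [Nat.mod_eq_of_lt hlt]
    · rw [if_neg h]
      rw [ih (n / 10) _ (by omega) (by omega)]
      rw [Nat.digits_def' (by norm_num : 1 < 10) hn]
      simp

theorem pvToChars_eq (x : Int) (hx : 0 < x) :
    PySem.Int.toChars x = ((Nat.digits 10 x.toNat).map Nat.digitChar).reverse := by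
  unfold PySem.Int.toChars
  rw [if_neg (by omega)]
  unfold Nat.toDigits
  rw [pvToDigitsCore_eq _ _ _ (by omega) (by omega)]
  simp

-- the digit list, positionally
theorem pvDigits_map (m : Nat) :
    Nat.digits 10 m = (List.range (Nat.digits 10 m).length).map (fun q => m / 10 ^ q % 10) := by
  induction m using Nat.strong_induction_on with
  | _ m ih =>
    rcases Nat.eq_zero_or_pos m with h0 | hpos
    · simp [h0]
    · rw [Nat.digits_def' (by norm_num : 1 < 10) hpos]
      have hlen : (m % 10 :: Nat.digits 10 (m / 10)).length = (Nat.digits 10 (m / 10)).length + 1 := rfl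
      rw [hlen, List.range_succ_eq_map, List.map_cons]
      congr 1
      · simp
      · rw [List.map_map]
        conv_lhs => rw [ih (m / 10) (Nat.div_lt_self hpos (by norm_num))]
        apply List.map_congr_left
        intro q _
        simp only [Function.comp_apply]
        rw [Nat.div_div_eq_div_mul, ← pow_succ']

theorem pvND_eq_of_range (x : Int) (d : Nat) (hd : 0 < d)
    (h1 : 10 ^ (d - 1) ≤ x) (h2 : x < 10 ^ d) : pvND x = d := by
  have hx : 0 < x := lt_of_lt_of_le (by positivity) h1
  have hl : 10 ^ (pvND x - 1) ≤ x := pvND_lower x hx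
  have hu : x < 10 ^ pvND x := pvND_upper x (by omega)
  have hp := pvND_pos x hx
  by_contra hne
  rcases Nat.lt_or_ge (pvND x) d with hlt | hge
  · have : (10:Int) ^ pvND x ≤ 10 ^ (d - 1) := pow_le_pow_right₀ (by norm_num) (by omega)
    omega
  · have : (10:Int) ^ d ≤ 10 ^ (pvND x - 1) := pow_le_pow_right₀ (by norm_num) (by omega)
    omega

-- character at position j of str(x) is the digit with exponent (d-1-j)
theorem pvDigits_getElem? (m q : Nat) (h : q < (Nat.digits 10 m).length) :
    (Nat.digits 10 m)[q]? = some (m / 10 ^ q % 10) := by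
  conv_lhs => rw [pvDigits_map m]
  rw [List.getElem?_map, List.getElem?_range h]
  rfl

theorem pvToChars_getElem? (x : Int) (hx : 0 < x) (j : Nat) (hj : j < pvND x) :
    (PySem.Int.toChars x)[j]? = some (Nat.digitChar (x.toNat / 10 ^ (pvND x - 1 - j) % 10)) := by
  rw [pvToChars_eq x hx]
  rw [List.getElem?_reverse (by simp only [List.length_map]; unfold pvND at hj; omega)]
  rw [List.getElem?_map]
  have hidx : (List.map Nat.digitChar (Nat.digits 10 x.toNat)).length - 1 - j = pvND x - 1 - j := by
    simp [pvND]
  rw [hidx, pvDigits_getElem? _ _ (by unfold pvND at hj ⊢; omega)]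
  rfl

-- digitChar is injective on digits
theorem pvDigitChar_inj (a b : Nat) (ha : a < 10) (hb : b < 10) :
    Nat.digitChar a = Nat.digitChar b ↔ a = b := by
  interval_cases a <;> interval_cases b <;> simp_all <;> decide

-- d-1 ≤ (number of positions below d satisfying p) ↔ at most one failure position
theorem pvCount_iff (d : Nat) (hd : 0 < d) (p : Nat → Bool) :
    (d : Int) - 1 ≤ ((List.range d).countP p : Int) ↔
      ∃ pos < d, ∀ j < d, j ≠ pos → p j = true := by
  have hsum : ((List.range d).filter p).length + ((List.range d).filter (fun j => ! p j)).length = d := by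
    have := List.length_eq_length_filter_add (l := List.range d) p
    simp at this
    omega
  rw [List.countP_eq_length_filter]
  constructor
  · intro h
    have hlen : ((List.range d).filter (fun j => ! p j)).length ≤ 1 := by
      omega
    cases hF : (List.range d).filter (fun j => ! p j) with
    | nil =>
      refine ⟨0, hd, ?_⟩
      intro j hj _
      by_contra hpj
      have : j ∈ (List.range d).filter (fun j => ! p j) := by
        rw [List.mem_filter]
        exact ⟨List.mem_range.mpr hj, by simp [hpj]⟩
      rw [hF] at this
      simp at this
    | cons a t =>
      have ht : t = [] := by
        rw [hF] at hlen
        simp only [List.length_cons] at hlen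
        exact List.eq_nil_of_length_eq_zero (by omega)
      subst ht
      have ha : a ∈ (List.range d).filter (fun j => ! p j) := by rw [hF]; simp
      rw [List.mem_filter, List.mem_range] at ha
      refine ⟨a, ha.1, ?_⟩
      intro j hj hne
      by_contra hpj
      have : j ∈ (List.range d).filter (fun j => ! p j) := by
        rw [List.mem_filter]
        exact ⟨List.mem_range.mpr hj, by simp [hpj]⟩
      rw [hF] at this
      simp at this
      exact hne this
  · rintro ⟨pos, hpos, hall⟩
    have hsub : (List.range d).filter (fun j => ! p j) ⊆ [pos] := by
      intro j hj
      rw [List.mem_filter, List.mem_range] at hj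
      have : j = pos := by
        by_contra hne
        have := hall j hj.1 hne
        simp [this] at hj
      simp [this]
    have hnd : ((List.range d).filter (fun j => ! p j)).Nodup :=
      (List.nodup_range).filter _
    have hle : ((List.range d).filter (fun j => ! p j)).length ≤ 1 := by
      cases hF2 : (List.range d).filter (fun j => ! p j) with
      | nil => simp
      | cons a t =>
        cases t with
        | nil => simp
        | cons b u =>
          exfalso
          rw [hF2] at hsub hnd
          have ha : a = pos := by simpa using hsub (by simp : a ∈ a :: b :: u)
          have hb : b = pos := by simpa using hsub (by simp : b ∈ a :: b :: u)
          rw [List.nodup_cons] at hnd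
          exact hnd.1 (by simp [ha, hb])
    omega

theorem pvStep_inv (num digit p v : Int) (b : Option Int) (P : Int → Prop)
    (hub : ∀ c, P c → ∃ m, b = some m ∧ c ≤ m) (hmem : ∀ m, b = some m → P m) :
    (∀ c, (P c ∨ (c = num + (v - digit) * p ∧ PySem.Int.mod c 3 = 0)) →
      ∃ m, (if PySem.Int.mod (num + (v - digit) * p) 3 = 0 &&
              (match b with | none => true | some bb => decide (bb < num + (v - digit) * p))
            then some (num + (v - digit) * p) else b) = some m ∧ c ≤ m)
    ∧ (∀ m, (if PySem.Int.mod (num + (v - digit) * p) 3 = 0 &&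
              (match b with | none => true | some bb => decide (bb < num + (v - digit) * p))
            then some (num + (v - digit) * p) else b) = some m →
        (P m ∨ (m = num + (v - digit) * p ∧ PySem.Int.mod m 3 = 0))) := by
  set cand := num + (v - digit) * p with hcand
  rcases b with _ | m0
  · by_cases h3 : PySem.Int.mod cand 3 = 0
    · have hcond : (PySem.Int.mod cand 3 = 0 &&
          (match (none : Option Int) with | none => true | some bb => decide (bb < cand))) = true := by
        simp only [decide_eq_true h3, Bool.true_and]
      rw [if_pos hcond]
      constructor
      · intro c hc
        rcases hc with hc | ⟨rfl, _⟩
        · obtain ⟨m, hm, _⟩ := hub c hc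
          exact absurd hm (by simp)
        · exact ⟨cand, rfl, le_refl _⟩
      · intro m hm
        injection hm with hm
        subst hm
        exact Or.inr ⟨rfl, h3⟩
    · have hcond : ¬ ((PySem.Int.mod cand 3 = 0 &&
          (match (none : Option Int) with | none => true | some bb => decide (bb < cand))) = true) := by
        simp only [decide_eq_false h3, Bool.false_and]
        exact Bool.false_ne_true
      rw [if_neg hcond]
      constructor
      · intro c hc
        rcases hc with hc | ⟨rfl, hc3⟩
        · obtain ⟨m, hm, _⟩ := hub c hc
          exact absurd hm (by simp)
        · exact absurd hc3 h3
      · intro m hm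
        exact absurd hm (by simp)
  · by_cases h3 : PySem.Int.mod cand 3 = 0
    · by_cases hlt : m0 < cand
      · have hcond : (PySem.Int.mod cand 3 = 0 &&
            (match (some m0 : Option Int) with | none => true | some bb => decide (bb < cand))) = true := by
          simp only [decide_eq_true h3, decide_eq_true hlt, Bool.and_self]
        rw [if_pos hcond]
        constructor
        · intro c hc
          refine ⟨cand, rfl, ?_⟩
          rcases hc with hc | ⟨rfl, _⟩
          · obtain ⟨m, hm, hcm⟩ := hub c hc
            injection hm with hm
            omega
          · exact le_refl _
        · intro m hm
          injection hm with hm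
          subst hm
          exact Or.inr ⟨rfl, h3⟩
      · have hcond : ¬ ((PySem.Int.mod cand 3 = 0 &&
            (match (some m0 : Option Int) with | none => true | some bb => decide (bb < cand))) = true) := by
          simp only [decide_eq_false hlt, Bool.and_false]
          exact Bool.false_ne_true
        rw [if_neg hcond]
        constructor
        · intro c hc
          rcases hc with hc | ⟨rfl, _⟩
          · obtain ⟨m, hm, hcm⟩ := hub c hc
            injection hm with hm
            exact ⟨m0, rfl, by omega⟩
          · exact ⟨m0, rfl, by omega⟩
        · intro m hm
          injection hm with hm
          exact Or.inl (hmem m (by rw [hm]))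
    · have hcond : ¬ ((PySem.Int.mod cand 3 = 0 &&
          (match (some m0 : Option Int) with | none => true | some bb => decide (bb < cand))) = true) := by
        simp only [decide_eq_false h3, Bool.false_and]
        exact Bool.false_ne_true
      rw [if_neg hcond]
      constructor
      · intro c hc
        rcases hc with hc | ⟨rfl, hc3⟩
        · obtain ⟨m, hm, hcm⟩ := hub c hc
          injection hm with hm
          exact ⟨m0, rfl, by omega⟩
        · exact absurd hc3 h3
      · intro m hm
        injection hm with hm
        exact Or.inl (hmem m (by rw [hm]))

theorem pvBestFold_inv (num digit p : Int) (vs : List Int) :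
    ∀ (b : Option Int) (P : Int → Prop),
    (∀ c, P c → ∃ m, b = some m ∧ c ≤ m) → (∀ m, b = some m → P m) →
    (∀ c, (P c ∨ ∃ v ∈ vs, c = num + (v - digit) * p ∧ PySem.Int.mod c 3 = 0) →
        ∃ m, (vs.foldl
          (fun b v =>
            if PySem.Int.mod (num + (v - digit) * p) 3 = 0 &&
                (match b with | none => true | some bb => decide (bb < num + (v - digit) * p))
            then some (num + (v - digit) * p) else b) b) = some m ∧ c ≤ m)
    ∧ (∀ m, (vs.foldl
          (fun b v =>
            if PySem.Int.mod (num + (v - digit) * p) 3 = 0 &&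
                (match b with | none => true | some bb => decide (bb < num + (v - digit) * p))
            then some (num + (v - digit) * p) else b) b) = some m →
        (P m ∨ ∃ v ∈ vs, m = num + (v - digit) * p ∧ PySem.Int.mod m 3 = 0)) := by
  induction vs with
  | nil =>
    intro b P hub hmem
    refine ⟨?_, ?_⟩
    · intro c hc
      rcases hc with hc | ⟨v, hv, _⟩
      · exact hub c hc
      · simp at hv
    · intro m hm
      exact Or.inl (hmem m hm)
  | cons v t ih =>
    intro b P hub hmem
    simp only [List.foldl_cons]
    obtain ⟨hub', hmem'⟩ := pvStep_inv num digit p v b P hub hmem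
    obtain ⟨ih1, ih2⟩ := ih _ (fun c => P c ∨ (c = num + (v - digit) * p ∧ PySem.Int.mod c 3 = 0)) hub' hmem'
    refine ⟨?_, ?_⟩
    · intro c hc
      apply ih1
      rcases hc with hc | ⟨w, hw, hcw⟩
      · exact Or.inl (Or.inl hc)
      · rcases List.mem_cons.mp hw with rfl | hwt
        · exact Or.inl (Or.inr ⟨hcw.1, hcw.2⟩)
        · exact Or.inr ⟨w, hwt, hcw⟩
    · intro m hm
      rcases ih2 m hm with (hP | hnew) | ⟨w, hwt, hmw⟩
      · exact Or.inl hP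
      · exact Or.inr ⟨v, List.mem_cons_self .., hnew⟩
      · exact Or.inr ⟨w, List.mem_cons_of_mem _ hwt, hmw⟩


def pvGoodUpTo (num : Int) (dN k : Nat) (c : Int) : Prop :=
  ∃ pos : Nat, pos < k ∧ ∃ v : Int,
    (if pos = dN - 1 then (1:Int) else 0) ≤ v ∧ v < 10 ∧
    c = num + (v - pvDig num pos) * 10 ^ pos ∧ PySem.Int.mod c 3 = 0

theorem pvBestB_inv (num digit p lo : Int) (b : Option Int) (P : Int → Prop)
    (hub : ∀ c, P c → ∃ m, b = some m ∧ c ≤ m) (hmem : ∀ m, b = some m → P m) :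
    (∀ c, (P c ∨ ∃ v : Int, lo ≤ v ∧ v < 10 ∧ c = num + (v - digit) * p ∧ PySem.Int.mod c 3 = 0) →
        ∃ m, pvBestB num digit p lo b = some m ∧ c ≤ m)
    ∧ (∀ m, pvBestB num digit p lo b = some m →
        (P m ∨ ∃ v : Int, lo ≤ v ∧ v < 10 ∧ m = num + (v - digit) * p ∧ PySem.Int.mod m 3 = 0)) := by
  obtain ⟨h1, h2⟩ := pvBestFold_inv num digit p (PySem.List.pyRange lo 10) b P hub hmem
  constructor
  · intro c hc
    apply h1
    rcases hc with hc | ⟨v, hv1, hv2, hc⟩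
    · exact Or.inl hc
    · exact Or.inr ⟨v, PySem.List.mem_pyRange_one.mpr ⟨hv1, hv2⟩, hc⟩
  · intro m hm
    rcases h2 m hm with hP | ⟨v, hv, hmv⟩
    · exact Or.inl hP
    · obtain ⟨hv1, hv2⟩ := PySem.List.mem_pyRange_one.mp hv
      exact Or.inr ⟨v, hv1, hv2, hmv⟩

theorem pvOuter_inv (num : Int) (dN : Nat) :
    ∀ k, k ≤ dN →
    ∃ b : Option Int,
      (((List.range k).map (Nat.cast : Nat → Int)).foldl
        (fun (st : Option Int × Int × Int) pos =>
          (pvBestB num (PySem.Int.mod st.2.2 10) st.2.1 (if pos = (dN : Int) - 1 then 1 else 0) st.1,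
           st.2.1 * 10, PySem.Int.floordiv st.2.2 10))
        (none, 1, num)) = (b, 10 ^ k, num / 10 ^ k)
      ∧ (∀ c, pvGoodUpTo num dN k c → ∃ m, b = some m ∧ c ≤ m)
      ∧ (∀ m, b = some m → pvGoodUpTo num dN k m) := by
  intro k
  induction k with
  | zero =>
    intro _
    refine ⟨none, by simp, ?_, ?_⟩
    · intro c hc
      obtain ⟨pos, hpos, _⟩ := hc
      omega
    · intro m hm
      simp at hm
  | succ k ih =>
    intro hk
    obtain ⟨b, hfold, hub, hmem⟩ := ih (by omega)
    rw [List.range_succ, List.map_append, List.foldl_append, hfold]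
    simp only [List.map_cons, List.map_nil, List.foldl_cons, List.foldl_nil]
    have hdigit : PySem.Int.mod (num / 10 ^ k) 10 = pvDig num k := by
      rw [PySem.Int.mod_eq_emod_of_pos (by norm_num)]
      rfl
    have hrest : PySem.Int.floordiv (num / 10 ^ k) 10 = num / 10 ^ (k + 1) := by
      rw [PySem.Int.floordiv_eq_ediv_of_pos (by norm_num), pow_succ]
      exact Int.ediv_ediv_of_nonneg (by positivity)
    have hlo : ((k : Int) = (dN : Int) - 1) ↔ (k = dN - 1) := by
      constructor
      · intro h
        omega
      · intro h
        omega
    obtain ⟨hub', hmem'⟩ := pvBestB_inv num (pvDig num k) (10 ^ k)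
      (if (k : Int) = (dN : Int) - 1 then 1 else 0) b (pvGoodUpTo num dN k) hub hmem
    refine ⟨pvBestB num (pvDig num k) (10 ^ k) (if (k : Int) = (dN : Int) - 1 then 1 else 0) b,
      ?_, ?_, ?_⟩
    · rw [hdigit, hrest]
      norm_num [pow_succ]
    · intro c hc
      apply hub'
      obtain ⟨pos, hpos, v, hv1, hv2, hc, h3⟩ := hc
      rcases Nat.lt_or_ge pos k with hlt | hge
      · exact Or.inl ⟨pos, hlt, v, hv1, hv2, hc, h3⟩
      · have : pos = k := by omega
        subst this
        refine Or.inr ⟨v, ?_, hv2, hc, h3⟩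
        split_ifs with hsp
        · rwa [if_pos (by omega : pos = dN - 1)] at hv1
        · rwa [if_neg (by omega : ¬ pos = dN - 1)] at hv1
    · intro m hm
      rcases hmem' m hm with hP | ⟨v, hv1, hv2, hmv, h3⟩
      · obtain ⟨pos, hpos, rest⟩ := hP
        exact ⟨pos, by omega, rest⟩
      · refine ⟨k, by omega, v, ?_, hv2, hmv, h3⟩
        split_ifs with hsp
        · rwa [if_pos (by omega : (k:Int) = (dN:Int) - 1)] at hv1
        · rwa [if_neg (by omega : ¬ (k:Int) = (dN:Int) - 1)] at hv1


-- wrappers connecting the port entry helpers to the characterizations above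
theorem pvArr_len (num : Int) : (pvDigitsA num []).length = pvND num := by
  unfold pvDigitsA
  rw [pvDigitsAGo_length (num.toNat + 1) num [] (by omega)]
  simp

theorem pvCountB_eq (num : Int) : pvCountB num 0 = (pvND num : Int) := by
  unfold pvCountB
  rw [pvCountBGo_eq (num.toNat + 1) num 0 (by omega)]
  simp

theorem pvGnomA_count (x y : List Char) (k : Nat) (g : Int) :
    pvGnomA x y (k : Int) g
      = g + ((List.range k).countP
          (fun (j : Nat) => decide (PySem.List.pyGet? x (j : Int) = PySem.List.pyGet? y (j : Int))) : Int) := by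
  unfold pvGnomA
  have ht : ((k : Int)).toNat = k := by omega
  rw [ht]
  exact pvGnomAGo_count x y k (k + 1) g (by omega)

theorem pvDig_toNat (x : Int) (hx : 0 ≤ x) (q : Nat) :
    pvDig x q = ((x.toNat / 10 ^ q % 10 : Nat) : Int) := by
  unfold pvDig
  rw [Int.natCast_mod, Int.natCast_div, Int.toNat_of_nonneg hx]
  push_cast
  rfl

-- reflection j ↦ d-1-j of the position index
theorem pvReflect (d : Nat) (A : Nat → Prop) :
    (∃ pos < d, ∀ j < d, j ≠ pos → A (d - 1 - j)) ↔ (∃ pos < d, ∀ q < d, q ≠ pos → A q) := by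
  constructor
  · rintro ⟨pos, hpos, hall⟩
    refine ⟨d - 1 - pos, by omega, ?_⟩
    intro q hq hne
    have hj := hall (d - 1 - q) (by omega) (by omega)
    have he : d - 1 - (d - 1 - q) = q := by omega
    rwa [he] at hj
  · rintro ⟨pos, hpos, hall⟩
    refine ⟨d - 1 - pos, by omega, ?_⟩
    intro j hj hne
    exact hall (d - 1 - j) (by omega) (by omega)

-- the while-loop condition of A is the "all digits but at most one agree" condition
theorem pvGnomCond_iff (num i : Int) (d : Nat) (hd : 0 < d)
    (hn1 : 10 ^ (d-1) ≤ num) (hn2 : num < 10 ^ d)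
    (hi1 : 10 ^ (d-1) ≤ i) (hi2 : i < 10 ^ d) :
    ((d : Int) - 1 ≤ pvGnomA (PySem.Int.toChars i) (PySem.Int.toChars num) (d : Int) 0) ↔
      ∃ pos < d, ∀ q < d, q ≠ pos → pvDig i q = pvDig num q := by
  have hipos : 0 < i := lt_of_lt_of_le (by positivity) hi1
  have hnpos : 0 < num := lt_of_lt_of_le (by positivity) hn1
  have hdi : pvND i = d := pvND_eq_of_range i d hd hi1 hi2
  have hdn : pvND num = d := pvND_eq_of_range num d hd hn1 hn2
  rw [pvGnomA_count, zero_add, pvCount_iff d hd]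
  have hper : ∀ j < d,
      ((fun (j : Nat) => decide (PySem.List.pyGet? (PySem.Int.toChars i) (j : Int)
          = PySem.List.pyGet? (PySem.Int.toChars num) (j : Int))) j = true)
        ↔ pvDig i (d - 1 - j) = pvDig num (d - 1 - j) := by
    intro j hj
    simp only [decide_eq_true_eq]
    rw [PySem.List.pyGet?_natCast, PySem.List.pyGet?_natCast]
    rw [pvToChars_getElem? i hipos j (by omega), pvToChars_getElem? num hnpos j (by omega)]
    rw [hdi, hdn]
    rw [Option.some_inj]
    rw [pvDigitChar_inj _ _ (Nat.mod_lt _ (by norm_num)) (Nat.mod_lt _ (by norm_num))]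
    rw [pvDig_toNat i (by omega), pvDig_toNat num (by omega)]
    exact ⟨fun h => by rw [h], fun h => by exact_mod_cast h⟩
  constructor
  · rintro ⟨pos, hpos, hall⟩
    apply (pvReflect d _).mp
    refine ⟨pos, hpos, ?_⟩
    intro j hj hne
    exact (hper j hj).mp (hall j hj hne)
  · intro h
    obtain ⟨pos, hpos, hall⟩ := (pvReflect d _).mpr h
    refine ⟨pos, hpos, ?_⟩
    intro j hj hne
    exact (hper j hj).mpr (hall j hj hne)


-- the predicate selecting A's final list
def pvApred (num : Int) (d : Nat) (i : Int) : Prop :=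
  (0 ≤ i ∧ i < 10 ^ d - 1) ∧ PySem.Int.mod i 3 = 0 ∧ 10 ^ (d - 1) ≤ i ∧
    ((d : Int) - 1 ≤ pvGnomA (PySem.Int.toChars i) (PySem.Int.toChars num) (d : Int) 0)

-- A's result is max over a list whose membership is pvApred
theorem pvArrItog (num : Int) :
    ∃ itog : List Int,
      max_division_by_3 num
        = (match PySem.List.max? itog id with | some v => v | none => 0)
      ∧ (∀ i, i ∈ itog ↔ pvApred num (pvND num) i) := by
  refine ⟨((((PySem.List.pyRange 0 ((10:Int) ^ pvND num - 1)).filter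
        (fun i => decide (PySem.Int.mod i 3 = 0))).filter
        (fun i => decide ((10:Int) ^ (pvND num - 1) ≤ i))).filter
        (fun i => decide ((pvND num : Int) - 1 ≤
          pvGnomA (PySem.Int.toChars i) (PySem.Int.toChars num) (pvND num : Int) 0))), ?_, ?_⟩
  · simp only [max_division_by_3]
    rw [pvArr_len]
    rw [PySem.List.pyRange_zero_natCast (pvND num)]
    rw [pvRep_fold]
    simp only [List.nil_append, List.length_map, List.length_range]
    rw [pvNines_fold]
    simp only [zero_mul, zero_add]
    rw [pvFilter_fold, pvFilter_fold, pvFilter_fold]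
    simp only [List.nil_append]
  · intro i
    simp only [List.mem_filter, PySem.List.mem_pyRange_one, decide_eq_true_eq]
    unfold pvApred
    tauto

-- A's membership predicate is B's candidate predicate minus the all-nines number
theorem pvApred_iff (num : Int) (d : Nat) (hd : 0 < d)
    (hn1 : 10 ^ (d - 1) ≤ num) (hn2 : num < 10 ^ d) (i : Int) :
    pvApred num d i ↔ (pvGoodUpTo num d d i ∧ i ≠ 10 ^ d - 1) := by
  have hn0 : (0:Int) ≤ num := le_trans (by positivity) hn1
  constructor
  · rintro ⟨⟨hi0, hi1⟩, h3, hlead, hgnom⟩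
    have hilt : i < 10 ^ d := by omega
    obtain ⟨pos, hpos, hall⟩ := (pvGnomCond_iff num i d hd hn1 hn2 hlead hilt).mp hgnom
    have heq := pvAgree_eq i num d pos hi0 hilt hn0 hn2 hpos hall
    refine ⟨⟨pos, hpos, pvDig i pos, ?_, pvDig_lt i pos, heq, h3⟩, by omega⟩
    split_ifs with hsp
    · subst hsp
      exact (pvLead i d hd hi0 hilt).mp hlead
    · exact pvDig_nonneg i pos
  · rintro ⟨⟨pos, hpos, v, hv1, hv2, heq, h3⟩, hne⟩
    have hv0 : (0:Int) ≤ v := by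
      split_ifs at hv1 with hsp
      · omega
      · exact hv1
    obtain ⟨hc0, hc1, hcpos, hcq⟩ := pvChange_spec num d pos v hn0 hn2 hpos hv0 hv2
    rw [← heq] at hc0 hc1 hcpos hcq
    have hlead : 10 ^ (d - 1) ≤ i := by
      apply (pvLead i d hd hc0 hc1).mpr
      by_cases hsp : pos = d - 1
      · rw [← hsp, hcpos]
        rw [if_pos hsp] at hv1
        exact hv1
      · rw [hcq (d - 1) (by omega)]
        exact (pvLead num d hd hn0 hn2).mp hn1
    refine ⟨⟨hc0, by omega⟩, h3, hlead, ?_⟩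
    apply (pvGnomCond_iff num i d hd hn1 hn2 hlead hc1).mpr
    exact ⟨pos, hpos, fun q _ hq => hcq q hq⟩

-- B's candidate set contains the all-nines number exactly on D_
theorem pvGood_nines_D (num : Int) (d : Nat) (hd : 0 < d) (hdnd : d = pvND num)
    (_hn1 : 10 ^ (d - 1) ≤ num) (hn2 : num < 10 ^ d) (hnum : 0 < num) :
    (pvGoodUpTo num d d (10 ^ d - 1) → D_max_division_by_3 num) ∧
    (D_max_division_by_3 num → pvGoodUpTo num d d (10 ^ d - 1)) := by
  have hn0 : (0:Int) ≤ num := le_of_lt hnum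
  constructor
  · rintro ⟨pos, hpos, v, hv1, hv2, heq, h3⟩
    have hv0 : (0:Int) ≤ v := by
      split_ifs at hv1 with hsp
      · omega
      · exact hv1
    obtain ⟨hc0, hc1, hcpos, hcq⟩ := pvChange_spec num d pos v hn0 hn2 hpos hv0 hv2
    rw [← heq] at hc0 hc1 hcpos hcq
    refine ⟨hnum, pos, by omega, ?_⟩
    intro q hq hqne
    rw [← hdnd] at hq
    rw [← hcq q hqne, pvNines_dig d q hq]
  · rintro ⟨_, pos, hpos, hall⟩
    rw [← hdnd] at hpos hall
    obtain ⟨hc0, hc1, hcpos, hcq⟩ := pvChange_spec num d pos 9 hn0 hn2 hpos (by norm_num) (by norm_num)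
    set c := num + (9 - pvDig num pos) * 10 ^ pos with hc
    have hcnines : c = 10 ^ d - 1 := by
      apply pvAllNines c d hd hc0 hc1
      intro q hq
      by_cases hqp : q = pos
      · rw [hqp, hcpos]
      · rw [hcq q hqp]
        exact hall q hq hqp
    refine ⟨pos, hpos, 9, ?_, by norm_num, by rw [← hc, hcnines], ?_⟩
    · split_ifs
      · norm_num
      · norm_num
    · rw [PySem.Int.mod_eq_zero_iff_dvd]
      exact pvThree_dvd d

-- there is always an eligible candidate that is not the all-nines number
theorem pvC0 (num : Int) (d : Nat) (hd : 0 < d)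
    (hn1 : 10 ^ (d - 1) ≤ num) (hn2 : num < 10 ^ d) :
    ∃ c, pvGoodUpTo num d d c ∧ c ≠ 10 ^ d - 1 := by
  have hn0 : (0:Int) ≤ num := le_trans (by positivity) hn1
  set bb := num - pvDig num 0 with hbb
  set r := bb % 3 with hr
  set v := 3 - r with hv
  have hr0 : 0 ≤ r := Int.emod_nonneg _ (by norm_num)
  have hr3 : r < 3 := Int.emod_lt_of_pos _ (by norm_num)
  have hv1 : 1 ≤ v := by omega
  have hv10 : v < 10 := by omega
  have he : 3 * (bb / 3) + r = bb := Int.mul_ediv_add_emod bb 3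
  set c := num + (v - pvDig num 0) * 10 ^ 0 with hc
  have h3 : PySem.Int.mod c 3 = 0 := by
    rw [PySem.Int.mod_eq_zero_iff_dvd]
    refine ⟨bb / 3 + 1, ?_⟩
    rw [hc]
    simp only [pow_zero, mul_one]
    omega
  obtain ⟨hc0, hc1, hcpos, _⟩ := pvChange_spec num d 0 v hn0 hn2 hd (by omega) hv10
  refine ⟨c, ⟨0, hd, v, ?_, hv10, rfl, h3⟩, ?_⟩
  · split_ifs
    · omega
    · omega
  · intro hne
    rw [← hc] at hcpos
    rw [hne, pvNines_dig d 0 hd] at hcpos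
    omega

-- B's port value is the maximum over its candidate set
theorem pvAlt_eq (num : Int) :
    ∃ b : Option Int,
      max_division_by_3_alt num = (match b with | some v => v | none => 0)
      ∧ (∀ c, pvGoodUpTo num (pvND num) (pvND num) c → ∃ m, b = some m ∧ c ≤ m)
      ∧ (∀ m, b = some m → pvGoodUpTo num (pvND num) (pvND num) m) := by
  obtain ⟨b, hfold, hub, hmem⟩ := pvOuter_inv num (pvND num) (pvND num) le_rfl
  refine ⟨b, ?_, hub, hmem⟩
  simp only [max_division_by_3_alt]
  rw [pvCountB_eq]
  rw [PySem.List.pyRange_zero_natCast]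
  rw [hfold]

-- MAIN-TODO
-- MAIN-TODO
-- ===== VERDICT (by name: the statement is the Claim_ definition above) =====
theorem max_division_by_3_spec : Claim_unchanged_max_division_by_3 := by
  intro num _ hpre hnD
  have hd := pvND_pos num hpre
  have hn1 := pvND_lower num hpre
  have hn2 := pvND_upper num (le_of_lt hpre)
  obtain ⟨itog, hAeq, hAmem⟩ := pvArrItog num
  obtain ⟨b, hBeq, hub, hmem⟩ := pvAlt_eq num
  obtain ⟨c0, hc0good, hc0ne⟩ := pvC0 num (pvND num) hd hn1 hn2
  obtain ⟨mB, hbB, _⟩ := hub c0 hc0good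
  have hmBgood := hmem mB hbB
  have hc0mem : c0 ∈ itog :=
    (hAmem c0).mpr ((pvApred_iff num (pvND num) hd hn1 hn2 c0).mpr ⟨hc0good, hc0ne⟩)
  cases hmax : PySem.List.max? itog id with
  | none =>
    rw [(PySem.List.max?_eq_none_iff itog id).mp hmax] at hc0mem
    exact absurd hc0mem (List.not_mem_nil)
  | some mA =>
    have hmAmem : mA ∈ itog := PySem.List.max?_mem hmax
    have hmAgood := (pvApred_iff num (pvND num) hd hn1 hn2 mA).mp ((hAmem mA).mp hmAmem)
    have hmBne : mB ≠ 10 ^ pvND num - 1 := by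
      intro h
      exact hnD ((pvGood_nines_D num (pvND num) hd rfl hn1 hn2 hpre).1 (h ▸ hmBgood))
    have hmBmem : mB ∈ itog :=
      (hAmem mB).mpr ((pvApred_iff num (pvND num) hd hn1 hn2 mB).mpr ⟨hmBgood, hmBne⟩)
    have h1 : mB ≤ mA := by
      have := PySem.List.max?_isMax hmax mB hmBmem
      simpa using this
    have h2 : mA ≤ mB := by
      obtain ⟨m, hm, hle⟩ := hub mA hmAgood.1
      rw [hbB] at hm
      injection hm with hm
      omega
    show max_division_by_3 num = max_division_by_3_alt num
    rw [hAeq, hBeq, hmax, hbB]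
    simp only []
    omega

theorem max_division_by_3_changed : Claim_changed_max_division_by_3 := by
  unfold Claim_changed_max_division_by_3; decide

theorem max_division_by_3_tight : Claim_exact_max_division_by_3 := by
  intro num _ hpre hD
  have hd := pvND_pos num hpre
  have hn1 := pvND_lower num hpre
  have hn2 := pvND_upper num (le_of_lt hpre)
  have hn0 : (0:Int) ≤ num := le_of_lt hpre
  obtain ⟨itog, hAeq, hAmem⟩ := pvArrItog num
  obtain ⟨b, hBeq, hub, hmem⟩ := pvAlt_eq num
  have hninesgood := (pvGood_nines_D num (pvND num) hd rfl hn1 hn2 hpre).2 hD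
  obtain ⟨mB, hbB, hnle⟩ := hub _ hninesgood
  have hmBgood := hmem mB hbB
  have hmBlt : mB < 10 ^ pvND num := by
    obtain ⟨pos, hpos, v, hv1, hv2, heq, _⟩ := hmBgood
    have hv0 : (0:Int) ≤ v := by
      split_ifs at hv1 with hsp
      · omega
      · exact hv1
    obtain ⟨_, hc1, _, _⟩ := pvChange_spec num (pvND num) pos v hn0 hn2 hpos hv0 hv2
    rw [← heq] at hc1
    exact hc1
  have hmBval : mB = 10 ^ pvND num - 1 := by omega
  have hbig : (10:Int) ^ pvND num ≥ 10 := by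
    calc (10:Int) ^ pvND num ≥ 10 ^ 1 := pow_le_pow_right₀ (by norm_num) (by omega)
    _ = 10 := by norm_num
  rw [hAeq, hBeq, hbB]
  cases hmax : PySem.List.max? itog id with
  | none =>
    simp only []
    omega
  | some mA =>
    have hmAmem : mA ∈ itog := PySem.List.max?_mem hmax
    have hmAlt : mA < 10 ^ pvND num - 1 := ((hAmem mA).mp hmAmem).1.2
    simp only []
    omega
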